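-- pv_equiv track=rewrite | github.com/gubenkoved/codeforces | 1748/b_diverse_substrings.py | solve
-- ===== SOURCE A (Python) =====
-- def solve(s):
--     count = 0
--     n = len(s)
--
--     for i in range(0, n):
--         freq_map = {s[i]: 1}
--         max_freq = 1
--         unique_count = 1
--
--         # add for the case where the number is simply s[i] itself
--         # which is always diverse
--         count += 1
--
--         for j in range(i + 1, n):
--             c = s[j]
--
--             # add a number
--             if c not in freq_map:
--                 freq_map[c] = 0
--                 unique_count += 1
--             freq_map[c] += 1
--             max_freq = max(max_freq, freq_map[c])
--
--             if max_freq > 10: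
--                 break
--
--             is_diverse = max_freq <= unique_count
--             if is_diverse:
--                 count += 1
--
--     return count
-- ===== SOURCE B (Python) =====
-- def solve(s):
--     n = len(s)
--     # cumulative table: prefix[k][x] = count of chr(x) in s[:k], for ASCII codes x < 128
--     prefix = [[0] * 128]
--     for ch in s:
--         row = prefix[-1].copy()
--         row[ord(ch)] += 1
--         prefix.append(row)
--     total = 0
--     for i in range(n):
--         total += 1  # the single character s[i] is always diverse
--         base = prefix[i]
--         for pj in prefix[i + 2:]:  # pj = prefix[j + 1] for j = i+1 .. n-1
--             maxf = 0
--             uniq = 0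
--             for a, b in zip(base, pj):
--                 d = b - a
--                 if d > 0:
--                     uniq += 1
--                     if d > maxf:
--                         maxf = d
--             if maxf > 10:
--                 break
--             if maxf <= uniq:
--                 total += 1
--     return total
-- ===== Notes on version B (the rewrite author's own statement) =====
-- stated objective: alternative
-- what changed: B precomputes a cumulative per-character-code count table (prefix rows) and derives each window's max frequency and distinct count by subtracting two table rows, instead of A's incrementally maintained frequency dict with running max and unique counters.
import Mathlib
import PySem

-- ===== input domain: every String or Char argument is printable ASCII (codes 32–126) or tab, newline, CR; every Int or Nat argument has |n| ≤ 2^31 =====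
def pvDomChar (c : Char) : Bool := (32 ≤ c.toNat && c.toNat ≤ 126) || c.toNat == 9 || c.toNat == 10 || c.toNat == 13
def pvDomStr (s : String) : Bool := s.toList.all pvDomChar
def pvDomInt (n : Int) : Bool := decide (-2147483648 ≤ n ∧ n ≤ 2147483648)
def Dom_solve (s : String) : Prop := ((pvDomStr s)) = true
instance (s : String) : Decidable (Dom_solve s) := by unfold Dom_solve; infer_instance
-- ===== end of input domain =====

-- B replaces A's incrementally maintained frequency dict / running max / running unique counter by a
-- precomputed cumulative count table queried by subtraction per window (alternative decomposition, not faster).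

-- ===== PORT A =====
-- inner loop 'for j in range(i+1, n)' of A, as structural recursion over the suffix s[i+1:];
-- state (freq_map, max_freq, unique_count, count)
def innerA : List Char → PySem.Dict Char Int → Int → Int → Int → Int
  | [], _, _, _, count => count
  | c :: rest, fm, maxf, uniq, count =>
    -- if c not in freq_map: freq_map[c] = 0; unique_count += 1
    let fm1 := if fm.contains c then fm else fm.insert c 0
    let uniq1 : Int := if fm.contains c then uniq else uniq + 1
    -- freq_map[c] += 1
    let v := fm1.getD c 0 + 1
    let fm2 := fm1.insert c v
    -- max_freq = max(max_freq, freq_map[c])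
    let maxf1 := max maxf v
    if 10 < maxf1 then count
    else innerA rest fm2 maxf1 uniq1 (if maxf1 ≤ uniq1 then count + 1 else count)

-- outer loop 'for i in range(0, n)', as structural recursion over suffixes of s
def outerA : List Char → Int → Int
  | [], count => count
  | c :: rest, count =>
    outerA rest (innerA rest (PySem.Dict.empty.insert c 1) 1 1 (count + 1))

def solve (s : String) : Int := outerA s.toList 0

-- ===== PORT B =====
-- 'prefix' rows: each step copies the previous row and does row[ord(ch)] += 1
-- (ord(ch) < 128 on the ASCII domain, where List.modify is exact for the Python list update)
def buildRows : List Char → List Int → List (List Int)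
  | [], _ => []
  | ch :: cs, row =>
    let r := row.modify ch.toNat (· + 1)
    r :: buildRows cs r

-- the 'for a, b in zip(base, pj)' fold computing (maxf, uniq)
def statsB (base pj : List Int) : Int × Int :=
  (List.zip base pj).foldl
    (fun mu ab =>
      let d := ab.2 - ab.1
      if 0 < d then (if mu.1 < d then d else mu.1, mu.2 + 1) else mu)
    (0, 0)

-- inner loop 'for pj in prefix[i+2:]'
def innerB (base : List Int) : List (List Int) → Int → Int
  | [], total => total
  | pj :: rest, total =>
    let mu := statsB base pj
    if 10 < mu.1 then total
    else innerB base rest (if mu.1 ≤ mu.2 then total + 1 else total)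

-- outer loop 'for i in range(n)' over the rows list (prefix has n+1 rows; stop when only prefix[n] is left)
def outerB : List (List Int) → Int → Int
  | [], total => total
  | [_], total => total
  | base :: r1 :: rest, total => outerB (r1 :: rest) (innerB base rest (total + 1))

def solve_alt (s : String) : Int :=
  let z : List Int := List.replicate 128 0
  let rows := z :: buildRows s.toList z
  outerB rows 0

-- ===== PRECONDITION & SPEC =====
def Spec_solve (s : String) (out : Int) : Prop := out = solve_alt s
instance (s : String) (out : Int) : Decidable (Spec_solve s out) := by unfold Spec_solve; infer_instance

-- ===== CLAIM (what is proved, stated in full; the proofs are below) =====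
def Claim_equal_solve : Prop := ∀ (s : String), Dom_solve s → Spec_solve s (solve s)

-- ===== LEMMAS AND PROOFS =====

-- count (as Int) of the character with code x in w
def cnt (w : List Char) (x : Nat) : Int := (w.count (Char.ofNat x) : Int)

-- the row of cumulative counts for the prefix w
def countRow (w : List Char) : List Int := (List.range 128).map (fun x => cnt w x)

-- max frequency over codes < 128, and number of distinct codes < 128 present
def Mst (w : List Char) : Int := (List.range 128).foldl (fun m x => max m (cnt w x)) 0
def Ust (w : List Char) : Int := ((List.range 128).countP (fun x => decide (0 < cnt w x)) : Int)

-- the rows countRow (t++[c₁]), countRow (t++[c₁,c₂]), … for cs = [c₁, c₂, …]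
def rowsFrom (t : List Char) : List Char → List (List Int)
  | [] => []
  | c :: cs => countRow (t ++ [c]) :: rowsFrom (t ++ [c]) cs

lemma toNat_lt_of_dom {c : Char} (h : pvDomChar c = true) : c.toNat < 128 := by
  simp [pvDomChar] at h; omega

lemma ofNat_eq_iff {c : Char} {x : Nat} (hc : c.toNat < 128) (hx : x < 128) :
    Char.ofNat x = c ↔ x = c.toNat := by
  constructor
  · intro h
    have := Char.toNat_ofNat x
    rw [h] at this
    have hv : x.isValidChar := Or.inl (by omega)
    simp [hv] at this
    omega
  · intro h; subst h; exact Char.ofNat_toNat c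

lemma cnt_append_singleton {w : List Char} {c : Char} {x : Nat}
    (hc : c.toNat < 128) (hx : x < 128) :
    cnt (w ++ [c]) x = cnt w x + (if x = c.toNat then 1 else 0) := by
  by_cases h : x = c.toNat
  · subst h
    simp [cnt, List.count_append, List.count_cons, Char.ofNat_toNat]
  · have : ¬ (Char.ofNat x = c) := fun hh => h ((ofNat_eq_iff hc hx).mp hh)
    simp [cnt, List.count_append, List.count_cons, h]
    intro hh; exact absurd hh.symm this

lemma cnt_nonneg (w : List Char) (x : Nat) : 0 ≤ cnt w x := by
  simp [cnt]

lemma cnt_pos_iff {w : List Char} {c : Char} (hc : c.toNat < 128) :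
    0 < cnt w c.toNat ↔ c ∈ w := by
  simp [cnt, Char.ofNat_toNat, List.count_pos_iff]

-- generic fold over a list of codes computing the pair (running max, #positives)
lemma pairfold (g : Nat → Int) (hg : ∀ x, 0 ≤ g x) :
    ∀ (l : List Nat) (m u : Int), 0 ≤ m →
    l.foldl (fun mu x =>
        let d := g x
        if 0 < d then (if mu.1 < d then d else mu.1, mu.2 + 1) else mu) (m, u)
      = (l.foldl (fun m x => max m (g x)) m, u + (l.countP (fun x => decide (0 < g x)) : Int)) := by
  intro l
  induction l with
  | nil => intro m u _; simp
  | cons x l ih =>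
    intro m u hm
    rw [List.foldl_cons, List.foldl_cons, List.countP_cons]
    by_cases h : 0 < g x
    · have h1 : (if m < g x then g x else m) = max m (g x) := by omega
      rw [if_pos h, h1, ih _ _ (by omega)]
      refine Prod.ext rfl ?_
      simp [h]
      push_cast
      ring
    · have h1 : max m (g x) = m := by have := hg x; omega
      rw [if_neg h, ih _ _ hm, h1]
      refine Prod.ext rfl ?_
      simp [h]
  
lemma statsB_eq (t w : List Char) :
    statsB (countRow t) (countRow (t ++ w)) = (Mst w, Ust w) := by
  have hz : (countRow t).zip (countRow (t ++ w))
      = (List.range 128).map (fun x => (cnt t x, cnt (t ++ w) x)) := by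
    simp [countRow, List.zip_map']
  have hd : ∀ x : Nat, cnt (t ++ w) x - cnt t x = cnt w x := by
    intro x; simp only [cnt, List.count_append]; push_cast; ring
  unfold statsB
  rw [hz, List.foldl_map]
  have := pairfold (fun x => cnt w x) (cnt_nonneg w) (List.range 128) 0 0 (le_refl 0)
  · simp only [hd]
    rw [this]
    simp [Mst, Ust]

-- congruence and init lemmas for the running-max fold
lemma foldl_max_congr (g g' : Nat → Int) :
    ∀ (l : List Nat), (∀ x ∈ l, g x = g' x) → ∀ m : Int,
    l.foldl (fun m x => max m (g x)) m = l.foldl (fun m x => max m (g' x)) m := by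
  intro l
  induction l with
  | nil => intro _ m; rfl
  | cons x l ih =>
    intro h m
    rw [List.foldl_cons, List.foldl_cons, h x (List.mem_cons_self), ih (fun y hy => h y (List.mem_cons_of_mem _ hy))]

lemma foldl_max_init (g : Nat → Int) :
    ∀ (l : List Nat) (m a : Int),
    l.foldl (fun m x => max m (g x)) (max m a) = max (l.foldl (fun m x => max m (g x)) m) a := by
  intro l
  induction l with
  | nil => intro m a; rfl
  | cons x l ih =>
    intro m a
    rw [List.foldl_cons, List.foldl_cons]
    have : max (max m a) (g x) = max (max m (g x)) a := by omega
    rw [this, ih]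

lemma countP_congr' (p q : Nat → Bool) :
    ∀ (l : List Nat), (∀ x ∈ l, p x = q x) → l.countP p = l.countP q := by
  intro l
  induction l with
  | nil => intro _; rfl
  | cons x l ih =>
    intro h
    rw [List.countP_cons, List.countP_cons, h x (List.mem_cons_self), ih (fun y hy => h y (List.mem_cons_of_mem _ hy))]

-- fold-max with one code bumped by 1
lemma foldmax_bump (g : Nat → Int) (k : Nat) :
    ∀ (l : List Nat), l.Nodup → k ∈ l → ∀ m : Int,
    l.foldl (fun m x => max m (g x + (if x = k then 1 else 0))) m
      = max (l.foldl (fun m x => max m (g x)) m) (g k + 1) := by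
  intro l
  induction l with
  | nil => intro _ hk; cases hk
  | cons x l ih =>
    intro hnd hk m
    rcases List.nodup_cons.mp hnd with ⟨hx, hnd'⟩
    by_cases hxk : x = k
    · subst hxk
      rw [List.foldl_cons, List.foldl_cons, if_pos rfl]
      have hcg : ∀ y ∈ l, (fun z => g z + (if z = x then 1 else 0)) y = g y := by
        intro y hy
        have : y ≠ x := fun h => hx (h ▸ hy)
        simp [this]
      rw [foldl_max_congr _ _ l hcg]
      have e1 : max m (g x + 1) = max (max m (g x)) (g x + 1) := by omega
      rw [e1, foldl_max_init]
    · have hk' : k ∈ l := List.mem_of_ne_of_mem (fun h => hxk h.symm) hk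
      rw [List.foldl_cons, List.foldl_cons, if_neg hxk, add_zero]
      exact ih hnd' hk' _

-- countP with one code bumped by 1
lemma countP_bump (g : Nat → Int) (k : Nat) (hg : 0 ≤ g k) :
    ∀ (l : List Nat), l.Nodup → k ∈ l →
    l.countP (fun x => decide (0 < g x + (if x = k then 1 else 0)))
      = l.countP (fun x => decide (0 < g x)) + (if 0 < g k then 0 else 1) := by
  intro l
  induction l with
  | nil => intro _ hk; cases hk
  | cons x l ih =>
    intro hnd hk
    rcases List.nodup_cons.mp hnd with ⟨hx, hnd'⟩
    by_cases hxk : x = k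
    · subst hxk
      rw [List.countP_cons, List.countP_cons]
      have hcg : ∀ y ∈ l, (fun z => decide (0 < g z + (if z = x then 1 else 0))) y
          = (fun z => decide (0 < g z)) y := by
        intro y hy
        have : y ≠ x := fun h => hx (h ▸ hy)
        simp [this]
      rw [countP_congr' _ _ l hcg]
      have h1 : decide (0 < g x + (if x = x then 1 else 0)) = true := by
        have e : (if x = x then (1:Int) else 0) = 1 := if_pos rfl
        rw [e, decide_eq_true_eq]; omega
      rw [h1]
      by_cases h2 : 0 < g x <;> simp [h2] <;> omega
    · have hk' : k ∈ l := List.mem_of_ne_of_mem (fun h => hxk h.symm) hk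
      rw [List.countP_cons, List.countP_cons, ih hnd' hk']
      have : (0 < g x + (if x = k then 1 else 0)) ↔ (0 < g x) := by rw [if_neg hxk]; omega
      simp only [this]
      omega

lemma Mst_append {w : List Char} {c : Char} (hc : c.toNat < 128) :
    Mst (w ++ [c]) = max (Mst w) (((w ++ [c]).count c : Int)) := by
  have hmem : c.toNat ∈ List.range 128 := List.mem_range.mpr hc
  have hcg : ∀ x ∈ List.range 128, cnt (w ++ [c]) x = cnt w x + (if x = c.toNat then 1 else 0) := by
    intro x hx
    exact cnt_append_singleton hc (List.mem_range.mp hx)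
  unfold Mst
  rw [foldl_max_congr _ _ _ hcg, foldmax_bump _ _ _ (List.nodup_range) hmem]
  have : ((w ++ [c]).count c : Int) = cnt w c.toNat + 1 := by
    simp [cnt, Char.ofNat_toNat, List.count_append, List.count_cons]
  rw [this]

lemma Ust_append {w : List Char} {c : Char} (hc : c.toNat < 128) :
    Ust (w ++ [c]) = Ust w + (if c ∈ w then 0 else 1) := by
  have hmem : c.toNat ∈ List.range 128 := List.mem_range.mpr hc
  have hcg : ∀ x ∈ List.range 128,
      (fun x => decide (0 < cnt (w ++ [c]) x)) x
        = (fun x => decide (0 < cnt w x + (if x = c.toNat then 1 else 0))) x := by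
    intro x hx
    simp only [cnt_append_singleton hc (List.mem_range.mp hx)]
  unfold Ust
  rw [countP_congr' _ _ _ hcg, countP_bump _ _ (cnt_nonneg w c.toNat) _ (List.nodup_range) hmem]
  have : (0 < cnt w c.toNat) ↔ c ∈ w := cnt_pos_iff hc
  push_cast
  by_cases h : c ∈ w <;> simp [h, this]

set_option maxRecDepth 8192 in
lemma Mst_nil : Mst [] = 0 := by decide

set_option maxRecDepth 8192 in
lemma Ust_nil : Ust [] = 0 := by decide

lemma Mst_single {c : Char} (hc : c.toNat < 128) : Mst [c] = 1 := by
  have := Mst_append (w := []) hc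
  simp only [List.nil_append] at this
  rw [this, Mst_nil]
  simp

lemma Ust_single {c : Char} (hc : c.toNat < 128) : Ust [c] = 1 := by
  have := Ust_append (w := []) hc
  simp only [List.nil_append] at this
  rw [this, Ust_nil]
  simp

-- one step of A's dict/state update matches the window statistics
lemma inner_eq :
    ∀ (rest : List Char) (t w : List Char) (fm : PySem.Dict Char Int) (maxf uniq count : Int),
    (∀ c ∈ rest, c.toNat < 128) → (∀ c ∈ w, c.toNat < 128) →
    (∀ x : Char, fm.getD x 0 = (w.count x : Int)) →
    (∀ x : Char, fm.contains x = true ↔ x ∈ w) →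
    maxf = Mst w → uniq = Ust w →
    innerA rest fm maxf uniq count = innerB (countRow t) (rowsFrom (t ++ w) rest) count := by
  intro rest
  induction rest with
  | nil => intro t w fm maxf uniq count _ _ _ _ _ _; simp [innerA, rowsFrom, innerB]
  | cons c rest ih =>
    intro t w fm maxf uniq count hrest hw hgetD hcont hmax huniq
    have hc : c.toNat < 128 := hrest c (List.mem_cons_self)
    have hrest' : ∀ x ∈ rest, x.toNat < 128 := fun x hx => hrest x (List.mem_cons_of_mem _ hx)
    have hw' : ∀ x ∈ w ++ [c], x.toNat < 128 := by
      intro x hx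
      rcases List.mem_append.mp hx with h | h
      · exact hw x h
      · simp at h; subst h; exact hc
    -- the updated dict / counters
    by_cases hcc : fm.contains c = true
    · have hcw : c ∈ w := (hcont c).mp hcc
      have hgetD2 : ∀ x : Char, ((fm.insert c (fm.getD c 0 + 1)).getD x 0) = (((w ++ [c]).count x : Nat) : Int) := by
        intro x
        rw [PySem.Dict.getD_insert]
        by_cases hx : x = c
        · subst hx; rw [if_pos rfl, hgetD]
          simp [List.count_append, List.count_cons]
        · rw [if_neg hx, hgetD]
          simp [List.count_append, List.count_cons, hx]
          intro h; exact absurd h.symm hx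
      have hcont2 : ∀ x : Char, (fm.insert c (fm.getD c 0 + 1)).contains x = true ↔ x ∈ w ++ [c] := by
        intro x
        rw [PySem.Dict.contains_insert]
        simp [hcont x, List.mem_append, or_comm]
      have hv : fm.getD c 0 + 1 = ((w ++ [c]).count c : Int) := by
        rw [hgetD]; simp [List.count_append, List.count_cons]
      have hmax2 : max maxf (fm.getD c 0 + 1) = Mst (w ++ [c]) := by
        rw [hv, hmax, Mst_append hc]
      have huniq2 : uniq = Ust (w ++ [c]) := by
        rw [huniq, Ust_append hc, if_pos hcw, add_zero]
      simp only [innerA, hcc, if_pos, rowsFrom, innerB, List.append_assoc, List.singleton_append] -- reduce both sides one step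
      rw [statsB_eq]
      simp only [hmax2, huniq2]
      by_cases hbr : 10 < Mst (w ++ [c])
      · simp only [if_pos hbr]
      · simp only [if_neg hbr]
        exact ih t (w ++ [c]) _ _ _ _ hrest' hw' hgetD2 hcont2 rfl rfl
    · have hcw : c ∉ w := fun h => hcc ((hcont c).mpr h)
      have hgetD2 : ∀ x : Char, (((fm.insert c 0).insert c ((fm.insert c 0).getD c 0 + 1)).getD x 0) = (((w ++ [c]).count x : Nat) : Int) := by
        intro x
        rw [PySem.Dict.getD_insert]
        by_cases hx : x = c
        · subst hx
          rw [if_pos rfl, PySem.Dict.getD_insert, if_pos rfl]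
          simp [List.count_append, List.count_cons, List.count_eq_zero_of_not_mem hcw]
        · rw [if_neg hx, PySem.Dict.getD_insert, if_neg hx, hgetD]
          simp [List.count_append, List.count_cons, hx]
          exact fun h => hx h.symm
      have hcont2 : ∀ x : Char, ((fm.insert c 0).insert c ((fm.insert c 0).getD c 0 + 1)).contains x = true ↔ x ∈ w ++ [c] := by
        intro x
        rw [PySem.Dict.contains_insert, PySem.Dict.contains_insert]
        simp [hcont x, List.mem_append, or_comm]
      have hv : (fm.insert c 0).getD c 0 + 1 = ((w ++ [c]).count c : Int) := by
        rw [PySem.Dict.getD_insert, if_pos rfl]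
        simp [List.count_append, List.count_cons, List.count_eq_zero_of_not_mem hcw]
      have hmax2 : max maxf ((fm.insert c 0).getD c 0 + 1) = Mst (w ++ [c]) := by
        rw [hv, hmax, Mst_append hc]
      have huniq2 : uniq + 1 = Ust (w ++ [c]) := by
        rw [huniq, Ust_append hc, if_neg hcw]
      simp only [innerA, hcc, rowsFrom, innerB, Bool.false_eq_true, if_false,
        List.append_assoc, List.singleton_append]
      rw [statsB_eq]
      simp only [hmax2, huniq2]
      by_cases hbr : 10 < Mst (w ++ [c])
      · simp only [if_pos hbr]
      · simp only [if_neg hbr]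
        exact ih t (w ++ [c]) _ _ _ _ hrest' hw' hgetD2 hcont2 rfl rfl

lemma outer_eq :
    ∀ (cs t : List Char) (count : Int), (∀ c ∈ cs, c.toNat < 128) →
    outerA cs count = outerB (countRow t :: rowsFrom t cs) count := by
  intro cs
  induction cs with
  | nil => intro t count _; simp [outerA, rowsFrom, outerB]
  | cons c cs ih =>
    intro t count hcs
    have hc : c.toNat < 128 := hcs c (List.mem_cons_self)
    have hcs' : ∀ x ∈ cs, x.toNat < 128 := fun x hx => hcs x (List.mem_cons_of_mem _ hx)
    simp only [outerA, rowsFrom, outerB]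
    rw [ih (t ++ [c]) _ hcs']
    congr 1
    have h0 : ∀ x : Char, (PySem.Dict.empty.insert c (1 : Int)).getD x 0 = (([c].count x : Nat) : Int) := by
      intro x
      rw [PySem.Dict.getD_insert]
      by_cases hx : x = c
      · subst hx; simp [List.count_cons]
      · rw [if_neg hx]
        simp [List.count_cons, hx, PySem.Dict.getD_empty]
        exact fun h => hx h.symm
    have h1 : ∀ x : Char, (PySem.Dict.empty.insert c (1 : Int)).contains x = true ↔ x ∈ [c] := by
      intro x
      rw [PySem.Dict.contains_insert]
      simp
    have := inner_eq cs t [c] (PySem.Dict.empty.insert c 1) 1 1 (count + 1) hcs'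
        (by intro x hx; simp at hx; subst hx; exact hc) h0 h1 (Mst_single hc).symm (Ust_single hc).symm
    simpa using this

lemma modify_countRow {t : List Char} {c : Char} (hc : c.toNat < 128) :
    (countRow t).modify c.toNat (· + 1) = countRow (t ++ [c]) := by
  apply List.ext_getElem
  · simp [countRow]
  · intro j h1 h2
    have hj : j < 128 := by simpa [countRow] using h2
    rw [List.getElem_modify]
    simp only [countRow, List.getElem_map, List.getElem_range]
    rw [cnt_append_singleton hc hj]
    by_cases h : c.toNat = j
    · rw [if_pos h, if_pos h.symm]
    · rw [if_neg h, if_neg (fun hh => h hh.symm), add_zero]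

lemma buildRows_eq :
    ∀ (cs t : List Char), (∀ c ∈ cs, c.toNat < 128) →
    buildRows cs (countRow t) = rowsFrom t cs := by
  intro cs
  induction cs with
  | nil => intro t _; rfl
  | cons c cs ih =>
    intro t hcs
    have hc : c.toNat < 128 := hcs c (List.mem_cons_self)
    simp only [buildRows, rowsFrom]
    rw [modify_countRow hc, ih (t ++ [c]) (fun x hx => hcs x (List.mem_cons_of_mem _ hx))]

set_option maxRecDepth 8192 in
lemma countRow_nil : countRow [] = List.replicate 128 0 := by decide

-- ===== VERDICT (by name: the statement is the Claim_ definition above) =====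
theorem solve_spec : Claim_equal_solve := by
  intro s hdom
  have hall : ∀ c ∈ s.toList, c.toNat < 128 := by
    intro c hc
    have : pvDomChar c = true := by
      have := hdom
      simp only [Dom_solve, pvDomStr, List.all_eq_true] at this
      exact this c hc
    exact toNat_lt_of_dom this
  show solve s = solve_alt s
  rw [show solve s = outerA s.toList 0 from rfl,
    show solve_alt s = outerB ((List.replicate 128 (0:Int)) :: buildRows s.toList (List.replicate 128 0)) 0 from rfl,
    ← countRow_nil, buildRows_eq _ _ hall]
  exact outer_eq s.toList [] 0 hall
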